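-- pv_equiv track=rewrite | github.com/SohamPrabhu/PythonSchool | Assignment2/sprabhu5_222_PA4.py | gather_engagement
-- ===== SOURCE A (Python) =====
-- def gather_engagement(names, reacts, grouping):
--     # The body of your function goes here
--
--     list_name =[]
--     grouping_colum = 0
--     reacts_index = 0
--
--     while grouping_colum < len(names):
--         upper = []
--         upper.append(names[grouping_colum])
--         count = 0
--         while reacts_index < len(reacts):
--             if count >= grouping [grouping_colum]:
--                 break
--             upper.append(reacts[reacts_index])
--             reacts_index+=1
--             count+=1
--         grouping_colum +=1
--         list_name.append(upper)
--
--
--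
--
--
--
--
--
--     return list_name
-- ===== SOURCE B (Python) =====
-- def gather_engagement(names, reacts, grouping):
--     out = []
--     start = 0
--     for i in range(len(names)):
--         if start < len(reacts):
--             chunk = reacts[start:start + max(grouping[i], 0)]
--             start += len(chunk)
--         else:
--             chunk = []
--         out.append([names[i], *chunk])
--     return out
-- ===== Notes on version B (the rewrite author's own statement) =====
-- stated objective: simpler
-- what changed: Replaces A's nested while loops with shared mutable counters by a single for-loop that forms each chunk with one clamped slice and advances the offset by the slice's length.
import Mathlib
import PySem

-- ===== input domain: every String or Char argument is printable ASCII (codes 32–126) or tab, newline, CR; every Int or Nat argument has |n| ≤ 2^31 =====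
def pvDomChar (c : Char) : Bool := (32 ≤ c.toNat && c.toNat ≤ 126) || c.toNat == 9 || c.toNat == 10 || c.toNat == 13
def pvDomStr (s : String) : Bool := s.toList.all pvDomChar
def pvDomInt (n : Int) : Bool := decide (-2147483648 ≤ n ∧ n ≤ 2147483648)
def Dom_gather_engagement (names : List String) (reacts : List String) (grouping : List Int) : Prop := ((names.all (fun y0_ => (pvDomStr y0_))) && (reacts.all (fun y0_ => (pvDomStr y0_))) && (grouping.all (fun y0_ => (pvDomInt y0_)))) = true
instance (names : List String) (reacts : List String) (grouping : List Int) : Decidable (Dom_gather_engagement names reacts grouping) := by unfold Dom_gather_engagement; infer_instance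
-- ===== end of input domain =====

-- ===== PORT A =====
-- B replaces A's nested while loops with one pass using a clamped slice per name; equivalence on all inputs where A returns (Pre_).
-- inner while loop of A: consumes reacts[ri], ri+1, ... while ri < len(reacts) and count < grouping[gc]
def gatherInnerA (grouping : List Int) (gc : Nat) (reacts : List String)
    (ri : Nat) (count : Int) (upper : List String) : List String × Nat :=
  if h : ri < reacts.length then
    if count ≥ PySem.List.pyGetD grouping (gc : Int) 0 then (upper, ri)
    else gatherInnerA grouping gc reacts (ri + 1) (count + 1) (upper ++ [reacts[ri]])
  else (upper, ri)
termination_by reacts.length - ri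

-- outer while loop of A
def gatherOuterA (names : List String) (reacts : List String) (grouping : List Int)
    (gc ri : Nat) (acc : List (List String)) : List (List String) :=
  if h : gc < names.length then
    let p := gatherInnerA grouping gc reacts ri 0 [names[gc]]
    gatherOuterA names reacts grouping (gc + 1) p.2 (acc ++ [p.1])
  else acc
termination_by names.length - gc

def gather_engagement (names : List String) (reacts : List String) (grouping : List Int) : List (List String) :=
  gatherOuterA names reacts grouping 0 0 []

-- ===== PORT B =====
-- B's for-loop over range(len(names)) with running offset `start`
def gatherGoB (names : List String) (reacts : List String) (grouping : List Int)
    (i start : Nat) (out : List (List String)) : List (List String) :=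
  if h : i < names.length then
    let chunk : List String :=
      if start < reacts.length then
        PySem.List.slice reacts (some (start : Int)) (some ((start : Int) + max (PySem.List.pyGetD grouping (i : Int) 0) 0))
      else []
    let start' := if start < reacts.length then start + chunk.length else start
    gatherGoB names reacts grouping (i + 1) start' (out ++ [names[i] :: chunk])
  else out
termination_by names.length - i

def gather_engagement_alt (names : List String) (reacts : List String) (grouping : List Int) : List (List String) :=
  gatherGoB names reacts grouping 0 0 []

-- ===== PRECONDITION & SPEC =====
-- Exactly the inputs on which Python A returns (elsewhere it raises IndexError on grouping[i]):
-- grouping has an entry for every name, or reacts is exhausted by the requested chunk sizes.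
def Pre_gather_engagement (names : List String) (reacts : List String) (grouping : List Int) : Prop :=
  names.length ≤ grouping.length ∨ (reacts.length : Int) ≤ (grouping.map (fun g => max g 0)).sum
instance (names : List String) (reacts : List String) (grouping : List Int) : Decidable (Pre_gather_engagement names reacts grouping) := by
  unfold Pre_gather_engagement; infer_instance
def pvWitness_gather_engagement : List String × List String × List Int := (["alice", "bob"], ["x", "y", "z"], [2, 2])

def Spec_gather_engagement (names : List String) (reacts : List String) (grouping : List Int) (out : List (List String)) : Prop := out = gather_engagement_alt names reacts grouping
instance (names : List String) (reacts : List String) (grouping : List Int) (out : List (List String)) : Decidable (Spec_gather_engagement names reacts grouping out) := by unfold Spec_gather_engagement; infer_instance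

-- ===== CLAIM (what is proved, stated in full; the proofs are below) =====
def Claim_equal_gather_engagement : Prop := ∀ (names : List String) (reacts : List String) (grouping : List Int), Dom_gather_engagement names reacts grouping → Pre_gather_engagement names reacts grouping → Spec_gather_engagement names reacts grouping (gather_engagement names reacts grouping)

-- ===== LEMMAS AND PROOFS =====

-- A's inner loop takes (g - count).toNat elements of reacts from index ri (clamped to what is left).
theorem gatherInnerA_eq (grouping : List Int) (gc : Nat) (reacts : List String) :
    ∀ (ri : Nat) (count : Int) (upper : List String),
      gatherInnerA grouping gc reacts ri count upper =
        (upper ++ (reacts.drop ri).take ((PySem.List.pyGetD grouping (gc : Int) 0 - count).toNat),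
         ri + min ((PySem.List.pyGetD grouping (gc : Int) 0 - count).toNat) (reacts.length - ri)) := by
  intro ri count upper
  induction ri, count, upper using gatherInnerA.induct grouping gc reacts with
  | case1 ri count upper h hge =>
    rw [gatherInnerA]
    simp only [h, dif_pos, if_pos hge]
    have hk : (PySem.List.pyGetD grouping (gc : Int) 0 - count).toNat = 0 := by omega
    rw [hk]
    simp
  | case2 ri count upper h hge ih =>
    rw [gatherInnerA]
    simp only [h, dif_pos, if_neg hge]
    rw [ih]
    have hk1 : 1 ≤ (PySem.List.pyGetD grouping (gc : Int) 0 - count).toNat := by omega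
    have hk2 : (PySem.List.pyGetD grouping (gc : Int) 0 - (count + 1)).toNat
        = (PySem.List.pyGetD grouping (gc : Int) 0 - count).toNat - 1 := by omega
    obtain ⟨k', hk'⟩ : ∃ k', (PySem.List.pyGetD grouping (gc : Int) 0 - count).toNat = k' + 1 :=
      ⟨(PySem.List.pyGetD grouping (gc : Int) 0 - count).toNat - 1, by omega⟩
    simp only [Prod.mk.injEq]
    constructor
    · rw [hk2, hk', List.append_assoc]
      congr 1
      rw [List.drop_eq_getElem_cons h, List.take_succ_cons]
      simp
    · rw [hk2, hk']; omega
  | case3 ri count upper h =>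
    rw [gatherInnerA]
    simp only [h, dif_neg, not_false_iff]
    have : reacts.length - ri = 0 := by omega
    simp [List.drop_eq_nil_of_le (by omega : reacts.length ≤ ri), this]

-- each step of the two loops coincide
theorem outer_eq (names : List String) (reacts : List String) (grouping : List Int) :
    ∀ (gc ri : Nat) (acc : List (List String)),
      gatherOuterA names reacts grouping gc ri acc = gatherGoB names reacts grouping gc ri acc := by
  intro gc ri acc
  induction gc, ri, acc using gatherOuterA.induct names reacts grouping with
  | case1 gc ri acc h p ih =>
    rw [gatherOuterA, gatherGoB]
    simp only [h, dif_pos]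
    have hp : p = gatherInnerA grouping gc reacts ri 0 [names[gc]] := rfl
    rw [hp] at ih
    rw [ih, gatherInnerA_eq grouping gc reacts]
    set g := PySem.List.pyGetD grouping (gc : Int) 0 with hg
    have hgt : (g - 0).toNat = (max g 0).toNat := by omega
    by_cases hr : ri < reacts.length
    · have hmax : ((max g 0).toNat : Int) = max g 0 := by omega
      have hsl : PySem.List.slice reacts (some (ri : Int)) (some ((ri : Int) + max g 0))
          = (reacts.drop ri).take ((max g 0).toNat) := by
        rw [← hmax]
        exact_mod_cast PySem.List.slice_natCast_add reacts ri ((max g 0).toNat)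
      simp only [hr, if_pos, hsl, hgt]
      congr 2
      simp [List.length_take, List.length_drop]
    · simp only [hr, if_neg, not_false_iff]
      have h0 : reacts.length - ri = 0 := by omega
      simp [List.drop_eq_nil_of_le (by omega : reacts.length ≤ ri), h0]
  | case2 gc ri acc h =>
    rw [gatherOuterA, gatherGoB]
    simp [h]

-- ===== VERDICT (by name: the statement is the Claim_ definition above) =====
theorem gather_engagement_spec : Claim_equal_gather_engagement := by
  intro names reacts grouping _ _
  unfold Spec_gather_engagement gather_engagement gather_engagement_alt
  exact outer_eq names reacts grouping 0 0 []
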